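-- pv_equiv track=rewrite | github.com/StephenRebel/ICS3U-Python | Python Code assignment/Peformance_2.py | tie_cases
-- ===== SOURCE A (Python) =====
-- def tie_cases(votes):
--     tie_case = []
--     for x in range(len(votes)):
--         if votes[x] == max(votes):
--             if x == 0:
--                 tie_case.append("Mickey Mouse")
--             if x == 1:
--                 tie_case.append("Donald Duck")
--             if x == 2:
--                 tie_case.append("Minnie Mouse")
--             if x == 3:
--                 tie_case.append("Goofy")
--     return(tie_case)
-- ===== SOURCE B (Python) =====
-- def tie_cases(votes):
--     # Single streaming pass: track the running maximum and reset/extend the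
--     # list of winning indices as it changes, then translate indices to names.
--     best = None
--     winner_idx = []
--     for i, v in enumerate(votes):
--         if best is None or v > best:
--             best = v
--             winner_idx = [i]
--         elif v == best:
--             winner_idx.append(i)
--     names = ["Mickey Mouse", "Donald Duck", "Minnie Mouse", "Goofy"]
--     return [names[i] for i in winner_idx if i < len(names)]
-- ===== Notes on version B (the rewrite author's own statement) =====
-- stated objective: faster
-- what changed: B replaces A's per-index rescan of max(votes) and four hard-coded index branches with a single streaming argmax pass (running best plus reset/append list of winning indices), followed by an index-to-name translation.
import Mathlib
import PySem

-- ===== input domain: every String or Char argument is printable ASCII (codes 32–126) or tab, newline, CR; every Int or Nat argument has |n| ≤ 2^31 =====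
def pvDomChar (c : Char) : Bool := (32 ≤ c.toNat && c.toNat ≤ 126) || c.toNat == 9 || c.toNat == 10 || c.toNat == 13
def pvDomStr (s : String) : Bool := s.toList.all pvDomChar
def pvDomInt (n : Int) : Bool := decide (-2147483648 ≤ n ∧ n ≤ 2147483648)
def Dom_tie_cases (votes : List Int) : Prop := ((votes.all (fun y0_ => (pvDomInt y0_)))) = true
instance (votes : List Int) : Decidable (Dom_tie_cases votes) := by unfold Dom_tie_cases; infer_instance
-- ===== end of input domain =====

-- B replaces A's per-iteration max() rescan and four hard-coded index branches by one
-- streaming argmax pass (running best + reset/append winning-index list), then maps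
-- indices to names (faster).


-- ===== PORT A =====
def tie_cases (votes : List Int) : List String :=
  (PySem.List.pyRange 0 votes.length 1).foldl
    (fun tie_case x =>
      if PySem.List.pyGet? votes x = PySem.List.max? votes (fun y => y) then
        let t1 := if x = 0 then tie_case ++ ["Mickey Mouse"] else tie_case
        let t2 := if x = 1 then t1 ++ ["Donald Duck"] else t1
        let t3 := if x = 2 then t2 ++ ["Minnie Mouse"] else t2
        if x = 3 then t3 ++ ["Goofy"] else t3
      else tie_case)
    []

-- ===== PORT B =====
def tieNames : List String := ["Mickey Mouse", "Donald Duck", "Minnie Mouse", "Goofy"]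

-- one streaming pass over enumerate(votes): running best and winning-index list
def tieStep (st : Option Int × List Int) (p : Int × Int) : Option Int × List Int :=
  match st.1 with
  | none => (some p.2, [p.1])
  | some b =>
    if b < p.2 then (some p.2, [p.1])
    else if p.2 = b then (some b, st.2 ++ [p.1])
    else st

def tie_cases_alt (votes : List Int) : List String :=
  let st := (PySem.List.enumerate votes 0).foldl tieStep (none, [])
  (st.2.filter (fun i => i < (tieNames.length : Int))).map
    (fun i => PySem.List.pyGetD tieNames i "")

-- ===== PRECONDITION & SPEC =====
def Spec_tie_cases (votes : List Int) (out : List String) : Prop := out = tie_cases_alt votes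
instance (votes : List Int) (out : List String) : Decidable (Spec_tie_cases votes out) := by unfold Spec_tie_cases; infer_instance

-- ===== CLAIM (what is proved, stated in full; the proofs are below) =====
def Claim_equal_tie_cases : Prop := ∀ (votes : List Int), Dom_tie_cases votes → Spec_tie_cases votes (tie_cases votes)

-- ===== LEMMAS AND PROOFS =====

-- the indices (in order) at which votes holds the value m
def winIdx (votes : List Int) (m : Int) : List Int :=
  (PySem.List.pyRange 0 votes.length 1).filter (fun i => PySem.List.pyGetD votes i 0 = m)

-- A's per-index name contribution (indices ≥ 4 contribute nothing).
def tieContrib (m : Int) (votes : List Int) (x : Int) : List String :=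
  if PySem.List.pyGet? votes x = some m then
    ((if x = 0 then ["Mickey Mouse"] else []) ++ (if x = 1 then ["Donald Duck"] else []) ++
     (if x = 2 then ["Minnie Mouse"] else []) ++ (if x = 3 then ["Goofy"] else []))
  else []

theorem tie_cases_eq_flatMap (votes : List Int) (m : Int)
    (hm : PySem.List.max? votes (fun y => y) = some m) :
    tie_cases votes = (PySem.List.pyRange 0 votes.length 1).flatMap (tieContrib m votes) := by
  unfold tie_cases
  rw [hm]
  have h : ∀ (l : List Int) (acc : List String),
      l.foldl (fun tie_case x =>
        if PySem.List.pyGet? votes x = some m then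
          let t1 := if x = 0 then tie_case ++ ["Mickey Mouse"] else tie_case
          let t2 := if x = 1 then t1 ++ ["Donald Duck"] else t1
          let t3 := if x = 2 then t2 ++ ["Minnie Mouse"] else t2
          if x = 3 then t3 ++ ["Goofy"] else t3
        else tie_case) acc
      = acc ++ l.flatMap (tieContrib m votes) := by
    intro l
    induction l with
    | nil => simp
    | cons a t ih =>
      intro acc
      simp only [List.foldl_cons, List.flatMap_cons, ih, tieContrib]
      split_ifs <;> simp_all
  simpa using h (PySem.List.pyRange 0 votes.length 1) []

-- flatMap of an if-singleton IS map-over-filter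
theorem flatMap_if_singleton {α β : Type} (l : List α) (g : α → List β) (p : α → Bool) (f : α → β)
    (h : ∀ x ∈ l, g x = if p x then [f x] else []) :
    l.flatMap g = (l.filter p).map f := by
  induction l with
  | nil => simp
  | cons a t ih =>
    have ha := h a (by simp)
    rw [List.flatMap_cons, ha, List.filter_cons, ih (fun x hx => h x (by simp [hx]))]
    by_cases hp : p a <;> simp [hp]


-- pyGetD on an appended list agrees with the prefix at prefix indices
theorem pyGetD_append_left_of_lt (l : List Int) (v : Int) (i : Int)
    (h0 : 0 ≤ i) (hl : i < (l.length : Int)) :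
    PySem.List.pyGetD (l ++ [v]) i 0 = PySem.List.pyGetD l i 0 := by
  have hl' : i < ((l ++ [v]).length : Int) := by simp; omega
  rw [PySem.List.pyGetD_eq_getElem (l ++ [v]) 0 h0 hl', PySem.List.pyGetD_eq_getElem l 0 h0 hl]
  exact List.getElem_append_left (by omega)

-- A's contribution as an if-singleton over in-range indices
theorem tieContrib_eq (votes : List Int) (m x : Int)
    (h0 : 0 ≤ x) (hl : x < (votes.length : Int)) :
    tieContrib m votes x =
      if (decide (PySem.List.pyGetD votes x 0 = m) && decide (x < 4)) then
        [PySem.List.pyGetD tieNames x ""] else [] := by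
  unfold tieContrib
  have hget : PySem.List.pyGet? votes x = some (PySem.List.pyGetD votes x 0) := by
    rw [PySem.List.pyGet?_eq_some_getElem votes h0 hl, PySem.List.pyGetD_eq_getElem votes 0 h0 hl]
  rw [hget]
  by_cases hv : PySem.List.pyGetD votes x 0 = m
  · by_cases h4 : x < 4
    · simp only [hv, decide_true, h4, Bool.and_self]
      interval_cases x <;> decide
    · have e0 : x ≠ 0 := by omega
      have e1 : x ≠ 1 := by omega
      have e2 : x ≠ 2 := by omega
      have e3 : x ≠ 3 := by omega
      simp [hv, h4, e0, e1, e2, e3]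
  · simp [hv]

-- B's streaming fold computes (max, winning indices)
theorem foldB_inv (votes : List Int) :
    ∀ (m : Int), PySem.List.max? votes (fun y => y) = some m →
    (PySem.List.enumerate votes 0).foldl tieStep (none, []) = (some m, winIdx votes m) := by
  induction votes using List.reverseRecOn with
  | nil => intro m hm; simp [PySem.List.max?] at hm
  | append_singleton l v ih =>
    intro m hm
    have hlen1 : (((l ++ [v]).length : Nat) : Int) = (l.length : Int) + 1 := by simp
    have henum : PySem.List.enumerate (l ++ [v]) 0
        = PySem.List.enumerate l 0 ++ [((l.length : Int), v)] := by
      rw [PySem.List.enumerate_append]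
      simp [PySem.List.enumerate_cons, PySem.List.enumerate_nil]
    have hrange : PySem.List.pyRange 0 (((l ++ [v]).length : Nat) : Int) 1
        = PySem.List.pyRange 0 (l.length : Int) 1 ++ [(l.length : Int)] := by
      rw [hlen1, PySem.List.pyRange_one_succ_right (by positivity)]
    have hlast : PySem.List.pyGetD (l ++ [v]) (l.length : Int) 0 = v := by
      rw [PySem.List.pyGetD_eq_getElem (l ++ [v]) 0 (by positivity) (by simp)]
      exact List.getElem_concat_length (by simp) _
    cases l with
    | nil =>
      simp only [List.nil_append] at hm henum ⊢
      have hv : m = v := by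
        rw [PySem.List.max?_id_cons] at hm
        simpa using hm.symm
      subst hv
      rw [henum]
      simp only [List.foldl_append, PySem.List.enumerate_nil, List.foldl_nil,
        List.foldl_cons, tieStep]
      unfold winIdx
      rw [show ((([m] : List Int).length : Nat) : Int) = (1 : Int) by simp,
        show PySem.List.pyRange 0 (1 : Int) 1 = [0] from by decide]
      simp [PySem.List.pyGetD_zero_cons]
    | cons a t =>
      obtain ⟨m0, hm0⟩ : ∃ m0, PySem.List.max? (a :: t) (fun y => y) = some m0 :=
        ⟨_, PySem.List.max?_id_cons a t⟩
      have hm0' : m0 = t.foldl max a := by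
        rw [PySem.List.max?_id_cons] at hm0
        exact (Option.some.inj hm0).symm
      have hmval : m = max m0 v := by
        rw [show (a :: t) ++ [v] = a :: (t ++ [v]) from rfl,
          PySem.List.max?_id_cons, List.foldl_append] at hm
        have := (Option.some.inj hm)
        simp only [List.foldl_cons, List.foldl_nil] at this
        rw [← hm0'] at this
        exact this.symm
      have hbound : ∀ i ∈ PySem.List.pyRange 0 (((a :: t).length : Nat) : Int) 1,
          PySem.List.pyGetD (a :: t) i 0 ≤ m0 := by
        intro i hi
        have hi' := (PySem.List.mem_pyRange_one).1 hi
        exact PySem.List.max?_isMax hm0 _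
          (PySem.List.pyGetD_mem _ 0 (by unfold PySem.Raise.InRange; omega))
      have hagree : ∀ i ∈ PySem.List.pyRange 0 (((a :: t).length : Nat) : Int) 1,
          PySem.List.pyGetD ((a :: t) ++ [v]) i 0 = PySem.List.pyGetD (a :: t) i 0 := by
        intro i hi
        have hi' := (PySem.List.mem_pyRange_one).1 hi
        exact pyGetD_append_left_of_lt _ v i hi'.1 hi'.2
      have hW : winIdx ((a :: t) ++ [v]) m
          = (winIdx (a :: t) m) ++ (if v = m then [(((a :: t).length : Nat) : Int)] else []) := by
        unfold winIdx
        rw [hrange, List.filter_append,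
          List.filter_congr (fun i hi => by rw [hagree i hi])]
        congr 1
        rw [List.filter_singleton, hlast]
        by_cases hvm : v = m <;> simp [hvm]
      rw [henum, List.foldl_append, ih m0 hm0, List.foldl_cons, List.foldl_nil]
      simp only [tieStep]
      by_cases h1 : m0 < v
      · have hmv : m = v := by rw [hmval]; exact max_eq_right (by omega)
        subst hmv
        rw [if_pos h1, hW, if_pos rfl]
        have hempty : winIdx (a :: t) m = [] := by
          unfold winIdx
          rw [List.filter_eq_nil_iff]
          intro i hi
          have := hbound i hi
          simp only [decide_eq_true_eq]
          omega
        rw [hempty]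
        simp
      · have hmm0 : m = m0 := by rw [hmval]; exact max_eq_left (by omega)
        subst hmm0
        rw [if_neg h1]
        by_cases h2 : v = m
        · rw [if_pos h2, hW, if_pos h2]
        · rw [if_neg h2, hW, if_neg h2]
          simp

-- ===== VERDICT (by name: the statement is the Claim_ definition above) =====
theorem tie_cases_spec : Claim_equal_tie_cases := by
  intro votes _
  unfold Spec_tie_cases
  match hv : votes with
  | [] => decide
  | v0 :: rest =>
    obtain ⟨m, hm⟩ : ∃ m, PySem.List.max? (v0 :: rest) (fun y => y) = some m :=
      ⟨rest.foldl max v0, PySem.List.max?_id_cons v0 rest⟩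
    rw [tie_cases_eq_flatMap _ m hm]
    unfold tie_cases_alt
    rw [foldB_inv _ m hm]
    have hlen : ((tieNames.length : Nat) : Int) = 4 := by decide
    rw [flatMap_if_singleton _ _ (fun i => decide (PySem.List.pyGetD (v0 :: rest) i 0 = m) && decide (i < 4))
        (fun i => PySem.List.pyGetD tieNames i "")]
    · simp only [winIdx, List.filter_filter, hlen]
      exact congrArg _ (List.filter_congr (fun x _ => by simp [Bool.and_comm]))
    · intro x hx
      have hx' := (PySem.List.mem_pyRange_one).1 hx
      exact tieContrib_eq (v0 :: rest) m x hx'.1 hx'.2
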